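-- pv_equiv track=rewrite | github.com/adityaramkumar/specanopy | examples/data-pipeline/src/behaviors/partitioner.py | partition_events
-- ===== SOURCE A (Python) =====
-- def partition_events(events: list[dict[str, any]], output_dir: str) -> dict[str, list[dict[str, any]]]:
--     """
--     Partition events by 'date' field into date-keyed dictionaries.
--
--     Args:
--         events: List of processed events
--         output_dir: Base output directory (for reference)
--
--     Returns:
--         dict[str, list[dict[str, any]]]: {date: [events]} mapping
--
--     Raises:
--         ValueError: If any event missing 'date' field
--     """
--     partitions: dict[str, list[dict[str, any]]] = {}
--     for event in events:
--         date = event.get('date')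
--         if not isinstance(date, str):
--             raise ValueError(f'event missing or invalid date field: {event}')
--         if date not in partitions:
--             partitions[date] = []
--         partitions[date].append(event)
--     return partitions
-- ===== SOURCE B (Python) =====
-- def partition_events(events: list[dict[str, any]], output_dir: str) -> dict[str, list[dict[str, any]]]:
--     """Partition events by 'date' field: validate once, then build each group by a per-date scan."""
--     for event in events:
--         date = event.get('date')
--         if not isinstance(date, str):
--             raise ValueError(f'event missing or invalid date field: {event}')
--     dates = dict.fromkeys(event['date'] for event in events)
--     return {d: [e for e in events if e['date'] == d] for d in dates}
-- ===== Notes on version B (the rewrite author's own statement) =====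
-- stated objective: alternative
-- what changed: Replaces A's single accumulating dict-scan with a validate-once pass, an ordered dedup of the date keys, and one filtering scan per distinct date (comprehension build).
import Mathlib
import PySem

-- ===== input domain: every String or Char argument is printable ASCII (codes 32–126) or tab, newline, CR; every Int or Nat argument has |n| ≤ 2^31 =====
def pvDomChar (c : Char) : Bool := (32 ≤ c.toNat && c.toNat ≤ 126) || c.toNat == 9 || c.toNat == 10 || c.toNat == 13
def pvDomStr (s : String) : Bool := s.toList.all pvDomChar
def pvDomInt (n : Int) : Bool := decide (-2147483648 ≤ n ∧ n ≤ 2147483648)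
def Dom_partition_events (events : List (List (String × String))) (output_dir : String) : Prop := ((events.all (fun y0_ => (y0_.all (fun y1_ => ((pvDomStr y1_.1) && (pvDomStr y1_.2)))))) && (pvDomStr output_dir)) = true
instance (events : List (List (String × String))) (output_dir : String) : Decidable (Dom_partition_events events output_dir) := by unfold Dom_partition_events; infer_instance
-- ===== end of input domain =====

-- B validates once and then builds each group by a per-date filtering scan over an ordered
-- dedup of the date keys, instead of A's single accumulating dict-scan (alternative, not faster).

-- ===== PORT A =====
def partition_events (events : List (List (String × String))) (output_dir : String) : List (String × List (List (String × String))) :=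
  (events.foldl (fun partitions event =>
      match (PySem.Dict.mk event).get? "date" with
      | none => partitions  -- Python raises ValueError here; excluded by Pre_
      | some date =>
        let partitions := if partitions.contains date then partitions
                          else partitions.insert date ([] : List (List (String × String)))
        partitions.modify date [] (· ++ [event])
    ) (PySem.Dict.empty : PySem.Dict String (List (List (String × String))))).items

-- ===== PORT B =====
-- event['date']; under Pre_ the key is present, so the getD default is never read
def pvKeyB (e : List (String × String)) : String := ((PySem.Dict.mk e).get? "date").getD ""

-- B's initial validation pass only raises (those inputs are outside Pre_), so the port carries the build only
def partition_events_alt (events : List (List (String × String))) (output_dir : String) : List (String × List (List (String × String))) :=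
  let dates := PySem.List.dedup (events.map pvKeyB)
  dates.map (fun d => (d, events.filter (fun e => pvKeyB e == d)))

-- ===== PRECONDITION & SPEC =====
-- Pre_ excludes exactly the inputs where some event lacks the 'date' key: there A (and B) raise ValueError
def Pre_partition_events (events : List (List (String × String))) (output_dir : String) : Prop :=
  events.all (fun e => ((PySem.Dict.mk e).get? "date").isSome) = true
instance (events : List (List (String × String))) (output_dir : String) : Decidable (Pre_partition_events events output_dir) := by unfold Pre_partition_events; infer_instance

def pvWitness_partition_events : (List (List (String × String))) × String :=
  ([[("date", "a"), ("x", "1")], [("date", "b")], [("date", "a")]], "out")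

def Spec_partition_events (events : List (List (String × String))) (output_dir : String) (out : List (String × List (List (String × String)))) : Prop := out = partition_events_alt events output_dir
instance (events : List (List (String × String))) (output_dir : String) (out : List (String × List (List (String × String)))) : Decidable (Spec_partition_events events output_dir out) := by unfold Spec_partition_events; infer_instance

-- ===== CLAIM (what is proved, stated in full; the proofs are below) =====
def Claim_equal_partition_events : Prop := ∀ (events : List (List (String × String))) (output_dir : String), Dom_partition_events events output_dir → Pre_partition_events events output_dir → Spec_partition_events events output_dir (partition_events events output_dir)

-- ===== LEMMAS AND PROOFS =====

-- Dict.modify unfolded to insert (definitional)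
theorem modify_eq_insert (d : PySem.Dict String (List (List (String × String)))) (k : String)
    (f : List (List (String × String)) → List (List (String × String))) :
    d.modify k [] f = d.insert k (f (d.getD k [])) := rfl

-- A's 'insert empty list then append' collapses to a single keyed modify when the key is fresh
theorem insert_then_modify (d : PySem.Dict String (List (List (String × String)))) (k : String)
    (hk : d.contains k = false) (v : List (String × String)) :
    (d.insert k []).modify k [] (· ++ [v]) = d.modify k [] (· ++ [v]) := by
  rw [modify_eq_insert, modify_eq_insert, PySem.Dict.getD_insert_self,
    PySem.Dict.insert_insert_self, PySem.Dict.getD_of_not_contains d [] hk]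

-- ===== VERDICT (by name: the statement is the Claim_ definition above) =====
theorem partition_events_spec : Claim_equal_partition_events := by
  intro events output_dir _hDom hPre
  unfold Spec_partition_events partition_events partition_events_alt
  unfold Pre_partition_events at hPre
  rw [List.all_eq_true] at hPre
  -- under Pre_ every step of A's loop is the keyed modify 'partitions[date] = partitions.get(date, []) + [event]'
  rw [PySem.List.foldl_congr_mem' events _ (fun d e => d.modify (pvKeyB e) [] (· ++ [e])) _
    (by
      intro e he acc
      have hs := hPre e he
      obtain ⟨date, hdate⟩ := Option.isSome_iff_exists.mp hs
      have hk : pvKeyB e = date := by simp [pvKeyB, hdate]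
      simp only [hdate, hk]
      by_cases hc : acc.contains date
      · simp [hc]
      · simp only [hc]
        exact insert_then_modify acc date (by simp [hc]) e)]
  -- view the loop as the standard pair-keyed grouping fold
  have hpair : events.foldl (fun d e => d.modify (pvKeyB e) [] (· ++ [e]))
      (PySem.Dict.empty : PySem.Dict String (List (List (String × String))))
      = (events.map (fun e => (pvKeyB e, e))).foldl (fun d p => d.modify p.1 [] (· ++ [p.2])) PySem.Dict.empty :=
    (List.foldl_map (f := fun e => (pvKeyB e, e)) (g := fun d p => d.modify p.1 [] (· ++ [p.2]))
      (l := events) (init := PySem.Dict.empty)).symm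
  rw [hpair]
  set pairs := events.map (fun e => (pvKeyB e, e)) with hpairs
  have hnd : ((pairs.foldl (fun d p => d.modify p.1 [] (· ++ [p.2])) PySem.Dict.empty)).keys.Nodup :=
    PySem.Dict.nodup_keys_foldl_modify_key pairs (fun p => p.1) [] (fun _ p => (· ++ [p.2]))
      PySem.Dict.empty (by simp [PySem.Dict.keys_empty])
  rw [PySem.Dict.items_eq_map_keys _ hnd []]
  have hkeys : ((pairs.foldl (fun d p => d.modify p.1 [] (· ++ [p.2])) PySem.Dict.empty)).keys
      = PySem.Set.ofList (events.map pvKeyB) := by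
    rw [PySem.Dict.keys_foldl_modify_key pairs (fun p => p.1) [] (fun _ p => (· ++ [p.2])) PySem.Dict.empty]
    simp [hpairs, PySem.Set.update, PySem.Set.ofList_eq_foldl, PySem.Dict.keys_empty, List.map_map,
      Function.comp_def]
  have hgetD : ∀ c, ((pairs.foldl (fun d p => d.modify p.1 [] (· ++ [p.2])) PySem.Dict.empty)).getD c []
      = events.filter (fun e => pvKeyB e == c) := by
    intro c
    rw [PySem.Dict.getD_foldl_modify_append]
    simp [hpairs, List.filter_map, Function.comp_def, List.map_map]
  simp only [hkeys, hgetD, PySem.List.dedup_eq_ofList]
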